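-- pv_equiv track=rewrite | github.com/cirosantilli/project-euler-solutions | solvers/989.py | g_from_factorization
-- ===== SOURCE A (Python) =====
-- from typing import List, Sequence, Tuple
--
-- def factorize_small(n: int) -> List[Tuple[int, int]]:
--     factors: List[Tuple[int, int]] = []
--     d: int = 2
--     while d * d <= n:
--         if n % d == 0:
--             exponent: int = 0
--             while n % d == 0:
--                 n //= d
--                 exponent += 1
--             factors.append((d, exponent))
--         d += 1 if d == 2 else 2
--     if n > 1:
--         factors.append((n, 1))
--     return factors
--
-- def g_from_factorization(n: int) -> int:
--     if n == 1:
--         return 1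
--
--     split_prime_count: int = 0
--     for prime, exponent in factorize_small(n):
--         if prime == 2:
--             return 0
--         if prime == 5:
--             if exponent >= 2:
--                 return 0
--             continue
--         residue: int = prime % 5
--         if residue in (2, 3):
--             return 0
--         split_prime_count += 1
--
--     return 1 << split_prime_count
-- ===== SOURCE B (Python) =====
-- def g_from_factorization(n: int) -> int:
--     # Recursive multiplicative definition: peel off the smallest prime factor,
--     # classify it, and combine the contributions by multiplication.
--     if n < 2:
--         return 1
--     p = _smallest_factor(n)
--     if p == 2 or p % 5 in (2, 3):
--         return 0
--     e = 0
--     while n % p == 0: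
--         n //= p
--         e += 1
--     if p == 5 and e >= 2:
--         return 0
--     rest = g_from_factorization(n)
--     return rest if p == 5 else 2 * rest
--
-- def _smallest_factor(n: int) -> int:
--     # smallest prime factor of n (n >= 2)
--     if n % 2 == 0:
--         return 2
--     d = 3
--     while d * d <= n:
--         if n % d == 0:
--             return d
--         d += 2
--     return n
-- ===== Notes on version B (the rewrite author's own statement) =====
-- stated objective: alternative
-- what changed: Replaced the iterative factorize-into-a-list-then-scan-with-accumulator by a recursive multiplicative definition: peel off the smallest prime factor (found by a restarted smallest-factor search), classify it, and combine contributions by multiplication over the recursion instead of a bit-shift of a counter.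
import Mathlib
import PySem

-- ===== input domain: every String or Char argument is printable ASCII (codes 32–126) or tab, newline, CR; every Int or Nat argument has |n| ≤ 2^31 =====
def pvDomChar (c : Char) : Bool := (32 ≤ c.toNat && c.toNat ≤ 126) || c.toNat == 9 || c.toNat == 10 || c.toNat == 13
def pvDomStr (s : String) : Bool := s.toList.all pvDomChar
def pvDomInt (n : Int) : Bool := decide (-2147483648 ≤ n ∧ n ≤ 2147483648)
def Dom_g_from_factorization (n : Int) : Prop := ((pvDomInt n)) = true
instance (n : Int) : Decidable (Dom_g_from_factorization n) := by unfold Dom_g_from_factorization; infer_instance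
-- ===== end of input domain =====

-- B replaces A's factorize-into-a-list-then-scan by a recursive multiplicative
-- definition peeling off the smallest prime factor (alternative decomposition).

-- ===== PORT A =====
-- inner while of factorize_small: divide out d, counting the exponent.
-- fuel only makes the recursion total; n.toNat bounds the iteration count at every call site.
def pvInnerA (fuel : Nat) (n d e : Int) : Int × Int :=
  match fuel with
  | 0 => (n, e)
  | f + 1 =>
    if PySem.Int.mod n d = 0 then pvInnerA f (PySem.Int.floordiv n d) d (e + 1) else (n, e)

-- outer while of factorize_small (fuel for totality only)
def pvFacLoop (fuel : Nat) (n d : Int) : List (Int × Int) :=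
  match fuel with
  | 0 => if n > 1 then [(n, 1)] else []
  | f + 1 =>
    if d * d ≤ n then
      if PySem.Int.mod n d = 0 then
        let p := pvInnerA n.toNat n d 0
        (d, p.2) :: pvFacLoop f p.1 (d + (if d = 2 then 1 else 2))
      else pvFacLoop f n (d + (if d = 2 then 1 else 2))
    else if n > 1 then [(n, 1)] else []

def factorize_small (n : Int) : List (Int × Int) := pvFacLoop (n.toNat + 1) n 2

-- the for-loop of g_from_factorization; 1 << c ported as 2 ^ c.toNat (c is always ≥ 0 here)
def pvClassify (l : List (Int × Int)) (c : Int) : Int :=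
  match l with
  | [] => 2 ^ c.toNat
  | (p, e) :: rest =>
    if p = 2 then 0
    else if p = 5 then (if e ≥ 2 then 0 else pvClassify rest c)
    else if PySem.Int.mod p 5 = 2 ∨ PySem.Int.mod p 5 = 3 then 0
    else pvClassify rest (c + 1)

def g_from_factorization (n : Int) : Int :=
  if n = 1 then 1 else pvClassify (factorize_small n) 0

-- ===== PORT B =====
-- Source B's _smallest_factor: odd trial loop (fuel for totality only)
def pvSpf (fuel : Nat) (n d : Int) : Int :=
  match fuel with
  | 0 => n
  | f + 1 =>
    if d * d ≤ n then
      if PySem.Int.mod n d = 0 then d else pvSpf f n (d + 2)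
    else n

def smallest_factor (n : Int) : Int :=
  if PySem.Int.mod n 2 = 0 then 2 else pvSpf n.toNat n 3

-- Source B's exponent-extraction while loop (fuel for totality only)
def pvInnerB (fuel : Nat) (n d e : Int) : Int × Int :=
  match fuel with
  | 0 => (n, e)
  | f + 1 =>
    if PySem.Int.mod n d = 0 then pvInnerB f (PySem.Int.floordiv n d) d (e + 1) else (n, e)

-- Source B's recursive g_from_factorization (fuel for totality only; the argument shrinks)
def pvGRec (fuel : Nat) (n : Int) : Int :=
  match fuel with
  | 0 => 1
  | f + 1 =>
    if n < 2 then 1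
    else
      let p := smallest_factor n
      if p = 2 ∨ PySem.Int.mod p 5 = 2 ∨ PySem.Int.mod p 5 = 3 then 0
      else
        let r := pvInnerB n.toNat n p 0
        if p = 5 ∧ r.2 ≥ 2 then 0
        else
          let rest := pvGRec f r.1
          if p = 5 then rest else 2 * rest

def g_from_factorization_alt (n : Int) : Int := pvGRec (n.toNat + 1) n

-- ===== PRECONDITION & SPEC =====
def Spec_g_from_factorization (n : Int) (out : Int) : Prop := out = g_from_factorization_alt n
instance (n : Int) (out : Int) : Decidable (Spec_g_from_factorization n out) := by unfold Spec_g_from_factorization; infer_instance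

-- ===== CLAIM (what is proved, stated in full; the proofs are below) =====
def Claim_equal_g_from_factorization : Prop := ∀ (n : Int), Dom_g_from_factorization n → Spec_g_from_factorization n (g_from_factorization n)

-- ===== LEMMAS AND PROOFS =====

theorem innerB_eq_innerA (fuel : Nat) : ∀ n d e, pvInnerB fuel n d e = pvInnerA fuel n d e := by
  induction fuel with
  | zero => intro n d e; rfl
  | succ f ih =>
    intro n d e
    simp only [pvInnerA, pvInnerB]
    split <;> simp [ih]

-- first component of the inner loop divides the input and is positive
theorem innerA_dvd (fuel : Nat) : ∀ (n d e : Int), 2 ≤ d → 1 ≤ n →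
    (pvInnerA fuel n d e).1 ∣ n ∧ 1 ≤ (pvInnerA fuel n d e).1 := by
  induction fuel with
  | zero => intro n d e _ hn; exact ⟨dvd_refl n, hn⟩
  | succ f ih =>
    intro n d e hd hn
    simp only [pvInnerA]
    by_cases hm : PySem.Int.mod n d = 0
    · have hdvd : d ∣ n := (PySem.Int.mod_eq_zero_iff_dvd n d).mp hm
      obtain ⟨k, hk⟩ := hdvd
      have hk1 : 1 ≤ k := by nlinarith
      have hfd : PySem.Int.floordiv n d = k := by
        rw [PySem.Int.floordiv_eq_ediv_of_pos (by omega), hk]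
        exact Int.mul_ediv_cancel_left k (by omega)
      rw [if_pos hm, hfd]
      obtain ⟨h1, h2⟩ := ih k d (e + 1) hd hk1
      exact ⟨h1.trans ⟨d, by rw [hk]; ring⟩, h2⟩
    · rw [if_neg hm]; exact ⟨dvd_refl n, hn⟩

-- with enough fuel, d no longer divides the result
theorem innerA_not_dvd (fuel : Nat) : ∀ (n d e : Int), 2 ≤ d → 1 ≤ n → n ≤ (fuel : Int) →
    ¬ d ∣ (pvInnerA fuel n d e).1 := by
  induction fuel with
  | zero => intro n d e _ hn hf; omega
  | succ f ih =>
    intro n d e hd hn hf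
    simp only [pvInnerA]
    by_cases hm : PySem.Int.mod n d = 0
    · have hdvd : d ∣ n := (PySem.Int.mod_eq_zero_iff_dvd n d).mp hm
      obtain ⟨k, hk⟩ := hdvd
      have hk1 : 1 ≤ k := by nlinarith
      have hfd : PySem.Int.floordiv n d = k := by
        rw [PySem.Int.floordiv_eq_ediv_of_pos (by omega), hk]
        exact Int.mul_ediv_cancel_left k (by omega)
      rw [if_pos hm, hfd]
      have h2k : 2 * k ≤ n := by nlinarith
      have hf' : n ≤ (f : Int) + 1 := by push_cast at hf; linarith
      exact ih k d (e + 1) hd hk1 (by omega)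
    · rw [if_neg hm]
      exact fun h => hm ((PySem.Int.mod_eq_zero_iff_dvd n d).mpr h)

-- when d divides n, the result is at most n / d (so strictly smaller than n)
theorem innerA_small (fuel : Nat) : ∀ (n d e : Int), 2 ≤ d → 1 ≤ n → d ∣ n → 1 ≤ (fuel : Int) →
    (pvInnerA fuel n d e).1 * d ≤ n := by
  intro n d e hd hn hdvd hf
  match fuel, hf with
  | f + 1, _ =>
    have hm : PySem.Int.mod n d = 0 := (PySem.Int.mod_eq_zero_iff_dvd n d).mpr hdvd
    obtain ⟨k, hk⟩ := hdvd
    have hk1 : 1 ≤ k := by nlinarith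
    have hfd : PySem.Int.floordiv n d = k := by
      rw [PySem.Int.floordiv_eq_ediv_of_pos (by omega), hk]
      exact Int.mul_ediv_cancel_left k (by omega)
    simp only [pvInnerA, if_pos hm, hfd]
    obtain ⟨h1, h2⟩ := innerA_dvd f k d (e + 1) hd hk1
    have := Int.le_of_dvd (by omega) h1
    nlinarith

-- the classification accumulator shifts out as a factor 2
theorem classify_succ (l : List (Int × Int)) : ∀ (c : Int), 0 ≤ c →
    pvClassify l (c + 1) = 2 * pvClassify l c := by
  induction l with
  | nil =>
    intro c hc
    simp only [pvClassify]
    rw [show (c + 1).toNat = c.toNat + 1 by omega, pow_succ]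
    ring
  | cons pe rest ih =>
    intro c hc
    obtain ⟨p, e⟩ := pe
    simp only [pvClassify]
    split_ifs
    · rfl
    · rfl
    · exact ih c hc
    · rfl
    · exact ih (c + 1) (by omega)

-- pvSpf finds the smallest odd divisor p with p * p ≤ n
theorem spf_finds (fuel : Nat) : ∀ (n d p : Int), 3 ≤ d → PySem.Int.mod d 2 = 1 →
    d ≤ p → PySem.Int.mod p 2 = 1 → p ∣ n → p * p ≤ n →
    (∀ k : Int, d ≤ k → k < p → PySem.Int.mod k 2 = 1 → ¬ k ∣ n) →
    p < (fuel : Int) + d →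
    pvSpf fuel n d = p := by
  induction fuel with
  | zero => intro n d p _ _ hdp _ _ _ _ hf; norm_num at hf; omega
  | succ f ih =>
    intro n d p hd3 hdo hdp hpo hpdvd hppn hno hf
    have hdo' : d % 2 = 1 := by rwa [PySem.Int.mod_eq_emod_of_pos (by omega)] at hdo
    have hpo' : p % 2 = 1 := by rwa [PySem.Int.mod_eq_emod_of_pos (by omega)] at hpo
    simp only [pvSpf]
    by_cases hdp' : d = p
    · subst hdp'
      rw [if_pos hppn, if_pos ((PySem.Int.mod_eq_zero_iff_dvd n d).mpr hpdvd)]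
    · have hlt : d + 2 ≤ p := by omega
      have hdd : d * d ≤ n := by nlinarith
      have hnd : ¬ PySem.Int.mod n d = 0 := fun h =>
        hno d le_rfl (by omega) hdo ((PySem.Int.mod_eq_zero_iff_dvd n d).mp h)
      rw [if_pos hdd, if_neg hnd]
      refine ih n (d + 2) p (by omega) ?_ hlt hpo hpdvd hppn ?_ ?_
      · rw [PySem.Int.mod_eq_emod_of_pos (by omega)]; omega
      · intro k hk1 hk2 hko; exact hno k (by omega) hk2 hko
      · push_cast at hf ⊢; omega

-- if no odd k with k * k ≤ n divides n, pvSpf returns n (any fuel)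
theorem spf_none (fuel : Nat) : ∀ (n d : Int), 3 ≤ d → PySem.Int.mod d 2 = 1 →
    (∀ k : Int, d ≤ k → PySem.Int.mod k 2 = 1 → k * k ≤ n → ¬ k ∣ n) →
    pvSpf fuel n d = n := by
  induction fuel with
  | zero => intro n d _ _ _; rfl
  | succ f ih =>
    intro n d hd3 hdo hno
    have hdo' : d % 2 = 1 := by rwa [PySem.Int.mod_eq_emod_of_pos (by omega)] at hdo
    simp only [pvSpf]
    by_cases hdd : d * d ≤ n
    · have hnd : ¬ PySem.Int.mod n d = 0 := fun h =>
        hno d le_rfl hdo hdd ((PySem.Int.mod_eq_zero_iff_dvd n d).mp h)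
      rw [if_pos hdd, if_neg hnd]
      refine ih n (d + 2) (by omega) ?_ ?_
      · rw [PySem.Int.mod_eq_emod_of_pos (by omega)]; omega
      · intro k hk hko hkk; exact hno k (by omega) hko hkk
    · rw [if_neg hdd]


-- A's outer loop on 1 yields the empty factor list
theorem facLoop_one (f : Nat) (d : Int) (hd : 2 ≤ d) : pvFacLoop f 1 d = [] := by
  cases f with
  | zero => simp [pvFacLoop]
  | succ f =>
    have h1 : ¬ (d * d ≤ 1) := by nlinarith
    simp [pvFacLoop, h1]

-- B's recursion on 1 yields 1
theorem gRec_one (fB : Nat) : pvGRec fB 1 = 1 := by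
  cases fB <;> simp [pvGRec]

-- one unfolding of B's recursion when p is the smallest divisor ≥ 2 of n
theorem gRec_eval (fB' : Nat) (n p : Int) (hn : 2 ≤ n) (hpdvd : p ∣ n) (hp2 : 2 ≤ p)
    (hmin : ∀ k : Int, 2 ≤ k → k < p → ¬ k ∣ n) :
    pvGRec (fB' + 1) n =
      if p = 2 ∨ PySem.Int.mod p 5 = 2 ∨ PySem.Int.mod p 5 = 3 then 0
      else if p = 5 ∧ (pvInnerA n.toNat n p 0).2 ≥ 2 then 0
      else if p = 5 then pvGRec fB' (pvInnerA n.toNat n p 0).1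
           else 2 * pvGRec fB' (pvInnerA n.toNat n p 0).1 := by
  have hcast : ((n.toNat : Int)) = n := Int.toNat_of_nonneg (by omega)
  have hsf : smallest_factor n = p := by
    by_cases hp2' : p = 2
    · subst hp2'
      unfold smallest_factor
      rw [if_pos ((PySem.Int.mod_eq_zero_iff_dvd n 2).mpr hpdvd)]
    · have hpodd : ¬ (2:Int) ∣ p := by
        intro h2p
        exact hmin 2 le_rfl (by omega) (h2p.trans hpdvd)
      have hp3 : 3 ≤ p := by omega
      have hn2 : ¬ (2:Int) ∣ n := fun h2n => hmin 2 le_rfl (by omega) h2n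
      unfold smallest_factor
      rw [if_neg (fun h => hn2 ((PySem.Int.mod_eq_zero_iff_dvd n 2).mp h))]
      have hpo : PySem.Int.mod p 2 = 1 := by
        rw [PySem.Int.mod_eq_emod_of_pos (by omega)]; omega
      by_cases hpp : p * p ≤ n
      · apply spf_finds n.toNat n 3 p (by norm_num) (by decide) hp3 hpo hpdvd hpp
        · intro k _ hkp _; exact hmin k (by omega) hkp
        · have : p ≤ n := Int.le_of_dvd (by omega) hpdvd
          rw [hcast]; omega
      · rw [not_le] at hpp
        have hpn : p = n := by
          by_contra hne
          have hplt : p < n := lt_of_le_of_ne (Int.le_of_dvd (by omega) hpdvd) hne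
          obtain ⟨j, hj⟩ := hpdvd
          have hj1 : 1 ≤ j := by nlinarith
          have hjne : j ≠ 1 := by intro h; rw [h, mul_one] at hj; omega
          have hjp : j < p := by nlinarith
          exact hmin j (by omega) hjp ⟨p, by rw [hj]; ring⟩
        rw [spf_none n.toNat n 3 (by norm_num) (by decide) ?_]
        · exact hpn.symm
        · intro k hk3 _ hkk hkdvd
          have hkp : k < p := by nlinarith
          exact hmin k (by omega) hkp hkdvd
  simp only [pvGRec]
  rw [if_neg (show ¬ n < 2 by omega), hsf, innerB_eq_innerA]

-- MAIN: A's loop-with-list equals B's recursion under the no-small-divisor invariant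
theorem main_lemma (f : Nat) : ∀ (n d : Int) (fB : Nat),
    2 ≤ n → (d = 2 ∨ (3 ≤ d ∧ PySem.Int.mod d 2 = 1)) →
    (∀ k : Int, 2 ≤ k → k < d → ¬ k ∣ n) →
    n < d + (f : Int) → n.toNat < fB →
    pvClassify (pvFacLoop f n d) 0 = pvGRec fB n := by
  induction f with
  | zero =>
    intro n d fB hn hcand hinv hfuel hfB
    exact absurd (dvd_refl n) (hinv n hn (by push_cast at hfuel; omega))
  | succ f ih =>
    intro n d fB hn hcand hinv hfuel hfB
    obtain ⟨fB', rfl⟩ : ∃ fB', fB = fB' + 1 := ⟨fB - 1, by omega⟩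
    have hfB' : n.toNat ≤ fB' := by omega
    have hd2 : 2 ≤ d := by rcases hcand with h | ⟨h, _⟩ <;> omega
    have hdo' : d = 2 ∨ d % 2 = 1 := by
      rcases hcand with h | ⟨h3, ho⟩
      · exact Or.inl h
      · right; rwa [PySem.Int.mod_eq_emod_of_pos (by omega)] at ho
    have hfuel' : n < d + (f : Int) + 1 := by push_cast at hfuel; omega
    have hstep1 : d + 1 ≤ d + (if d = 2 then 1 else 2) := by split_ifs <;> omega
    have hstep2 : d + (if d = 2 then 1 else 2) ≤ d + 2 := by split_ifs <;> omega
    have hcand' : d + (if d = 2 then 1 else 2) = 2 ∨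
        (3 ≤ d + (if d = 2 then 1 else 2) ∧
          PySem.Int.mod (d + (if d = 2 then 1 else 2)) 2 = 1) := by
      right
      refine ⟨by omega, ?_⟩
      rw [PySem.Int.mod_eq_emod_of_pos (by omega)]
      split_ifs with h
      · omega
      · rcases hdo' with h2 | ho
        · exact absurd h2 h
        · omega
    have hinv' : ∀ (m : Int), m ∣ n → ¬ d ∣ m →
        ∀ k : Int, 2 ≤ k → k < d + (if d = 2 then 1 else 2) → ¬ k ∣ m := by
      intro m hmn hdm k hk2 hkd' hkm
      have hkn : k ∣ n := hkm.trans hmn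
      by_cases hkd : k < d
      · exact hinv k hk2 hkd hkn
      · by_cases hkeq : k = d
        · exact hdm (hkeq ▸ hkm)
        · rcases hdo' with hd2' | hdodd
          · rw [if_pos hd2'] at hkd'; omega
          · rw [if_neg (show d ≠ 2 by omega)] at hkd'
            have hk1 : k = d + 1 := by omega
            have h2n : (2:Int) ∣ n := dvd_trans (show (2:Int) ∣ k by omega) hkn
            exact hinv 2 le_rfl (by omega) h2n
    simp only [pvFacLoop]
    by_cases hdd : d * d ≤ n
    · rw [if_pos hdd]
      by_cases hm : PySem.Int.mod n d = 0
      · rw [if_pos hm]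
        have hdvd : d ∣ n := (PySem.Int.mod_eq_zero_iff_dvd n d).mp hm
        obtain ⟨hr_dvd, hr_pos⟩ := innerA_dvd n.toNat n d 0 hd2 (by omega)
        have hr_nd : ¬ d ∣ (pvInnerA n.toNat n d 0).1 :=
          innerA_not_dvd n.toNat n d 0 hd2 (by omega) (by omega)
        have hr_small := innerA_small n.toNat n d 0 hd2 (by omega) hdvd (by omega)
        have hm2n : (pvInnerA n.toNat n d 0).1 * 2 ≤ n := by nlinarith
        have hmn : (pvInnerA n.toNat n d 0).1 < n := by omega
        have hrec : pvClassify
            (pvFacLoop f (pvInnerA n.toNat n d 0).1 (d + (if d = 2 then 1 else 2))) 0 =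
            pvGRec fB' (pvInnerA n.toNat n d 0).1 := by
          by_cases hm1 : (pvInnerA n.toNat n d 0).1 = 1
          · rw [hm1, facLoop_one f _ (by omega), gRec_one]
            norm_num [pvClassify]
          · refine ih (pvInnerA n.toNat n d 0).1 (d + (if d = 2 then 1 else 2)) fB'
              (by omega) hcand' (hinv' _ hr_dvd hr_nd) ?_ (by omega)
            split_ifs <;> omega
        rw [gRec_eval fB' n d hn hdvd hd2 hinv]
        by_cases h2 : d = 2
        · subst h2
          simp [pvClassify]
        · simp only [if_neg h2] at hcand' hinv' ⊢
          have hrec : pvClassify (pvFacLoop f (pvInnerA n.toNat n d 0).1 (d + 2)) 0 =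
              pvGRec fB' (pvInnerA n.toNat n d 0).1 := by
            by_cases hm1 : (pvInnerA n.toNat n d 0).1 = 1
            · rw [hm1, facLoop_one f _ (by omega), gRec_one]
              norm_num [pvClassify]
            · exact ih (pvInnerA n.toNat n d 0).1 (d + 2) fB' (by omega) hcand'
                (hinv' _ hr_dvd hr_nd) (by omega) (by omega)
          simp only [pvClassify]
          by_cases h5 : d = 5
          · subst h5
            rw [if_neg (by norm_num : ¬(5:Int) = 2), if_pos rfl,
              if_neg (show ¬((5:Int) = 2 ∨ PySem.Int.mod 5 5 = 2 ∨ PySem.Int.mod 5 5 = 3) by decide)]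
            by_cases he : (pvInnerA n.toNat n 5 0).2 ≥ 2
            · rw [if_pos he, if_pos ⟨rfl, he⟩]
            · rw [if_neg he, if_neg (fun h => he h.2), if_pos rfl]
              exact hrec
          · rw [if_neg h2, if_neg h5]
            by_cases hres : PySem.Int.mod d 5 = 2 ∨ PySem.Int.mod d 5 = 3
            · rw [if_pos hres, if_pos (Or.inr hres)]
            · rw [if_neg hres,
                if_neg (show ¬(d = 2 ∨ PySem.Int.mod d 5 = 2 ∨ PySem.Int.mod d 5 = 3) by tauto),
                if_neg (fun h => h5 h.1), if_neg h5,
                classify_succ _ 0 le_rfl, hrec]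
      · rw [if_neg hm]
        have hnd : ¬ d ∣ n := fun h => hm ((PySem.Int.mod_eq_zero_iff_dvd n d).mpr h)
        refine ih n (d + (if d = 2 then 1 else 2)) (fB' + 1) hn hcand'
          (hinv' n (dvd_refl n) hnd) ?_ hfB
        split_ifs <;> omega
    · rw [if_neg hdd, if_pos (show n > 1 by omega)]
      rw [not_le] at hdd
      have hprim : ∀ k : Int, 2 ≤ k → k < n → ¬ k ∣ n := by
        intro k hk2 hkn hkdvd
        by_cases hkd : k < d
        · exact hinv k hk2 hkd hkdvd
        · obtain ⟨j, hj⟩ := hkdvd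
          have hj1 : 1 ≤ j := by nlinarith
          have hjne : j ≠ 1 := by intro h; rw [h, mul_one] at hj; omega
          have hjd : j < d := by nlinarith
          exact hinv j (by omega) hjd ⟨k, by rw [hj]; ring⟩
      rw [gRec_eval fB' n n hn (dvd_refl n) (by omega) hprim]
      simp only [pvClassify]
      by_cases h2 : n = 2
      · rw [if_pos h2, if_pos (Or.inl h2)]
      · rw [if_neg h2]
        by_cases h5 : n = 5
        · subst h5
          rw [if_pos rfl,
            if_neg (show ¬((5:Int) = 2 ∨ PySem.Int.mod 5 5 = 2 ∨ PySem.Int.mod 5 5 = 3) by decide),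
            show pvInnerA (Int.toNat 5) 5 5 0 = (1, 1) by decide]
          simp [gRec_one]
        · rw [if_neg h5]
          by_cases hres : PySem.Int.mod n 5 = 2 ∨ PySem.Int.mod n 5 = 3
          · rw [if_pos hres, if_pos (Or.inr hres)]
          · rw [if_neg hres,
              if_neg (show ¬(n = 2 ∨ PySem.Int.mod n 5 = 2 ∨ PySem.Int.mod n 5 = 3) by tauto),
              if_neg (fun h => h5 h.1), if_neg h5]
            have hm1 : (pvInnerA n.toNat n n 0).1 = 1 := by
              obtain ⟨hdv, hpos⟩ := innerA_dvd n.toNat n n 0 (by omega) (by omega)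
              have hnd := innerA_not_dvd n.toNat n n 0 (by omega) (by omega) (by omega)
              have hle := Int.le_of_dvd (by omega) hdv
              by_contra hne
              have hlt : (pvInnerA n.toNat n n 0).1 < n :=
                lt_of_le_of_ne hle (fun h => hnd (show n ∣ _ by rw [h]))
              exact hprim _ (by omega) hlt hdv
            rw [hm1, gRec_one]
            norm_num [pvClassify]

-- ===== VERDICT (by name: the statement is the Claim_ definition above) =====
theorem g_from_factorization_spec : Claim_equal_g_from_factorization := by
  intro n _
  unfold Spec_g_from_factorization g_from_factorization g_from_factorization_alt factorize_small
  by_cases h1 : n = 1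
  · subst h1; decide
  · simp only [if_neg h1]
    by_cases h2 : 2 ≤ n
    · exact main_lemma (n.toNat + 1) n 2 (n.toNat + 1) h2 (Or.inl rfl)
        (by intro k hk hk2; omega) (by push_cast; omega) (by omega)
    · -- n ≤ 0 (n ≠ 1, n < 2): both sides are 1
      have hn : n ≤ 0 := by omega
      have ht : n.toNat = 0 := by omega
      rw [ht]
      simp [pvFacLoop, pvGRec, pvClassify, show ¬(4 ≤ n) by omega,
        show ¬(1 < n) by omega, show n < 2 by omega]
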